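-- pv_equiv track=rewrite | github.com/NewUU-CS111-Fall2023/week-3-assignments-graphs-Raxmonberdiyev | src/py/Problem2.py | solve
-- ===== SOURCE A (Python) =====
-- from collections import deque
--
-- def solve(n, m, j, maze):
--     dx = [0, 0, -1, 1]
--     dy = [-1, 1, 0, 0]
--     visited = [[[False]*(j+1) for _ in range(m)] for _ in range(n)]
--     queue = deque()
--
--     for i in range(n):
--         for k in range(m):
--             if maze[i][k] == '@':
--                 queue.append((i, k, 0))
--                 visited[i][k][0] = True
--
--     while queue:
--         x, y, s = queue.popleft()
--         if maze[x][y] == 'x':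
--             return "SUCCESS"
--
--         for i in range(4):
--             nx, ny = x + dx[i], y + dy[i]
--             if nx < 0 or nx >= n or ny < 0 or ny >= m:
--                 continue
--             if maze[nx][ny] == '#':
--                 continue
--             if maze[nx][ny] == 's' and s < j and not visited[nx][ny][s+1]:
--                 visited[nx][ny][s+1] = True
--                 queue.append((nx, ny, s+1))
--             elif maze[nx][ny] != 's' and not visited[nx][ny][s]:
--                 visited[nx][ny][s] = True
--                 queue.append((nx, ny, s))
--
--     return "IMPOSSIBLE"
-- ===== SOURCE B (Python) =====
-- def solve(n, m, j, maze):
--     dirs = ((0, -1), (0, 1), (-1, 0), (1, 0))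
--     states = set()
--     for r in range(n):
--         for c in range(m):
--             if maze[r][c] == '@':
--                 states.add((r, c, 0))
--     for _ in range(n * m * (j + 1)):
--         new = set(states)
--         for (x, y, s) in states:
--             for dx, dy in dirs:
--                 nx, ny = x + dx, y + dy
--                 if 0 <= nx < n and 0 <= ny < m and maze[nx][ny] != '#':
--                     if maze[nx][ny] == 's':
--                         if s < j:
--                             new.add((nx, ny, s + 1))
--                     else:
--                         new.add((nx, ny, s))
--         if new == states:
--             break
--         states = new
--     return "SUCCESS" if any(maze[x][y] == 'x' for (x, y, s) in states) else "IMPOSSIBLE"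
-- ===== Notes on version B (the rewrite author's own statement) =====
-- stated objective: alternative
-- what changed: Replaces the deque BFS with early return and a 3D visited boolean array by a round-based fixpoint saturation of the reachable (row,col,stones) state set, followed by a single final scan for a reachable 'x' cell.
import Mathlib
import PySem

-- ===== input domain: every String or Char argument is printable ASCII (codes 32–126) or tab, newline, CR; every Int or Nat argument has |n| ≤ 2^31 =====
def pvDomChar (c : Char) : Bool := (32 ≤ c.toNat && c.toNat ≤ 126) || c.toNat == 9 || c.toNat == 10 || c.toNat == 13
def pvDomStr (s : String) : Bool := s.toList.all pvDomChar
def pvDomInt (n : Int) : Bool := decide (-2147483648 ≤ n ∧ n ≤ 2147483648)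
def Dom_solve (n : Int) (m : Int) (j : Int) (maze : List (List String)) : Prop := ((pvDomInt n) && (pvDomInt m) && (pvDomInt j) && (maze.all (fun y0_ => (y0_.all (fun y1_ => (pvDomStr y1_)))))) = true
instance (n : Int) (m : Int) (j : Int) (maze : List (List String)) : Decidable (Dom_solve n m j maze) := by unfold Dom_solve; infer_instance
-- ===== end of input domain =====

-- B replaces A's deque BFS (3D visited array, early return) by a round-based fixpoint
-- saturation of the reachable (row, col, stones) state set with a final scan for an 'x'
-- cell: a different algorithm of similar cost, proved to return the same string.

-- ===== PORT A =====
-- A-side helpers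
def cellAt (maze : List (List String)) (i k : Int) : String :=
  PySem.List.pyGetD (PySem.List.pyGetD maze i []) k ""

def get3 (v : List (List (List Bool))) (i k s : Int) : Bool :=
  PySem.List.pyGetD (PySem.List.pyGetD (PySem.List.pyGetD v i []) k []) s true

def set3 (v : List (List (List Bool))) (i k s : Int) (b : Bool) : List (List (List Bool)) :=
  PySem.List.pySetD v i
    (PySem.List.pySetD (PySem.List.pyGetD v i []) k
      (PySem.List.pySetD (PySem.List.pyGetD (PySem.List.pyGetD v i []) k []) s b))

def dirList : List (Int × Int) := [(0, -1), (0, 1), (-1, 0), (1, 0)]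

def cnt3 (v : List (List (List Bool))) : Nat :=
  (v.map (fun r => (r.map (fun c => c.count true)).sum)).sum
def sz3 (v : List (List (List Bool))) : Nat :=
  (v.map (fun r => (r.map List.length).sum)).sum

def relax (n m j : Int) (maze : List (List String)) (x y s : Int)
    (acc : List (List (List Bool)) × List (Int × Int × Int)) (d : Int × Int) :
    List (List (List Bool)) × List (Int × Int × Int) :=
  let nx := x + d.1
  let ny := y + d.2
  if nx < 0 ∨ nx ≥ n ∨ ny < 0 ∨ ny ≥ m then acc
  else if cellAt maze nx ny = "#" then acc
  else if cellAt maze nx ny = "s" ∧ s < j ∧ get3 acc.1 nx ny (s + 1) = false then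
    (set3 acc.1 nx ny (s + 1) true, acc.2 ++ [(nx, ny, s + 1)])
  else if cellAt maze nx ny ≠ "s" ∧ get3 acc.1 nx ny s = false then
    (set3 acc.1 nx ny s true, acc.2 ++ [(nx, ny, s)])
  else acc

-- termination helpers
theorem count_set_true (xs : List Bool) (k : Nat) (hk : k < xs.length) (hf : xs[k] = false) :
    (xs.set k true).count true = xs.count true + 1 := by
  induction xs generalizing k with
  | nil => simp at hk
  | cons a t ih =>
    cases k with
    | zero => simp_all
    | succ k' =>
      simp only [List.set_cons_succ, List.count_cons]
      rw [ih k' (by simpa using hk) (by simpa using hf)]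
      omega

theorem sum_map_set {α : Type} (f : α → Nat) (l : List α) (a : Nat) (x y : α)
    (h : l[a]? = some x) :
    ((l.set a y).map f).sum + f x = (l.map f).sum + f y := by
  induction l generalizing a with
  | nil => simp at h
  | cons b t ih =>
    cases a with
    | zero => simp_all; omega
    | succ a' =>
      simp only [List.getElem?_cons_succ] at h
      simp only [List.set_cons_succ, List.map_cons, List.sum_cons]
      have := ih a' h
      omega

theorem pyGet?_eq_some_of_pyGetD_ne {α : Type} (xs : List α) (i : Int) (d : α)
    (h : PySem.List.pyGetD xs i d ≠ d) :
    PySem.List.pyGet? xs i = some (PySem.List.pyGetD xs i d) := by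
  unfold PySem.List.pyGetD at *
  cases hg : PySem.List.pyGet? xs i with
  | none => rw [hg] at h; simp at h
  | some v => simp

theorem pyGet?_idx {α : Type} (xs : List α) (i : Int) (v : α)
    (h : PySem.List.pyGet? xs i = some v) :
    ∃ a, PySem.List.pyIdx? xs.length i = some a ∧ xs[a]? = some v := by
  unfold PySem.List.pyGet? at h
  cases hk : PySem.List.pyIdx? xs.length i with
  | none => rw [hk] at h; simp at h
  | some a => rw [hk] at h; exact ⟨a, rfl, by simpa using h⟩

theorem pySetD_of_idx {α : Type} (xs : List α) (i : Int) (a : Nat) (v : α)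
    (h : PySem.List.pyIdx? xs.length i = some a) :
    PySem.List.pySetD xs i v = xs.set a v := by
  unfold PySem.List.pySetD PySem.List.pySet?
  rw [h]; rfl

theorem cnt3_le_sz3 (v : List (List (List Bool))) : cnt3 v ≤ sz3 v := by
  unfold cnt3 sz3
  induction v with
  | nil => simp
  | cons r t ih =>
    simp only [List.map_cons, List.sum_cons]
    have h1 : (r.map (fun c => c.count true)).sum ≤ (r.map List.length).sum := by
      induction r with
      | nil => simp
      | cons c t2 ih2 =>
        simp only [List.map_cons, List.sum_cons]
        exact Nat.add_le_add (List.count_le_length) ih2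
    omega

theorem set3_flip (v : List (List (List Bool))) (i k s : Int)
    (h : get3 v i k s = false) :
    sz3 (set3 v i k s true) = sz3 v ∧ cnt3 (set3 v i k s true) = cnt3 v + 1 := by
  unfold get3 at h
  set row := PySem.List.pyGetD v i [] with hrow
  set col := PySem.List.pyGetD row k [] with hcol
  have hcs : PySem.List.pyGet? col s = some false := by
    have := pyGet?_eq_some_of_pyGetD_ne col s true (by rw [h]; simp)
    rw [h] at this; exact this
  obtain ⟨c, hc_idx, hc_get⟩ := pyGet?_idx col s false hcs
  have hcol_ne : col ≠ [] := by
    intro he; rw [he] at hc_get; simp at hc_get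
  have hrk : PySem.List.pyGet? row k = some col := by
    apply pyGet?_eq_some_of_pyGetD_ne
    rw [← hcol]; exact hcol_ne
  obtain ⟨b, hb_idx, hb_get⟩ := pyGet?_idx row k col hrk
  have hrow_ne : row ≠ [] := by
    intro he; rw [he] at hb_get; simp at hb_get
  have hvi : PySem.List.pyGet? v i = some row := by
    apply pyGet?_eq_some_of_pyGetD_ne
    rw [← hrow]; exact hrow_ne
  obtain ⟨a, ha_idx, ha_get⟩ := pyGet?_idx v i row hvi
  have hclen : c < col.length := by
    have := List.getElem?_eq_some_iff.mp hc_get; exact this.1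
  have hcfalse : col[c] = false := by
    have := List.getElem?_eq_some_iff.mp hc_get; exact this.2
  -- rewrite set3 into nested List.set
  have hset3 : set3 v i k s true = v.set a (row.set b (col.set c true)) := by
    unfold set3
    rw [← hrow, ← hcol]
    rw [pySetD_of_idx col s c true hc_idx,
        pySetD_of_idx row k b _ hb_idx,
        pySetD_of_idx v i a _ ha_idx]
  rw [hset3]
  have hlen_col : (col.set c true).length = col.length := by simp
  have hcnt_col : (col.set c true).count true = col.count true + 1 :=
    count_set_true col c hclen hcfalse
  have hrow_len := sum_map_set List.length row b col (col.set c true) hb_get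
  have hrow_cnt := sum_map_set (fun c2 => c2.count true) row b col (col.set c true) hb_get
  have hv_len := sum_map_set (fun r => (r.map List.length).sum) v a row
      (row.set b (col.set c true)) ha_get
  have hv_cnt := sum_map_set (fun r => (r.map (fun c2 => c2.count true)).sum) v a row
      (row.set b (col.set c true)) ha_get
  simp only [hlen_col] at hrow_len
  simp only [hcnt_col] at hrow_cnt
  constructor
  · unfold sz3
    simp only at hv_len
    omega
  · unfold cnt3
    simp only at hv_cnt
    omega

def measure3 (acc : List (List (List Bool)) × List (Int × Int × Int)) : Nat :=
  (sz3 acc.1 - cnt3 acc.1) + acc.2.length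

theorem relax_measure (n m j : Int) (maze : List (List String)) (x y s : Int)
    (acc : List (List (List Bool)) × List (Int × Int × Int)) (d : Int × Int) :
    measure3 (relax n m j maze x y s acc d) = measure3 acc := by
  unfold relax
  dsimp only
  split_ifs with h1 h2 h3 h4
  · rfl
  · rfl
  · obtain ⟨hsz, hcnt⟩ := set3_flip acc.1 (x + d.1) (y + d.2) (s + 1) h3.2.2
    have hle := cnt3_le_sz3 (set3 acc.1 (x + d.1) (y + d.2) (s + 1) true)
    rw [hsz, hcnt] at hle
    simp only [measure3, hsz, hcnt, List.length_append, List.length_cons, List.length_nil]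
    omega
  · obtain ⟨hsz, hcnt⟩ := set3_flip acc.1 (x + d.1) (y + d.2) s h4.2
    have hle := cnt3_le_sz3 (set3 acc.1 (x + d.1) (y + d.2) s true)
    rw [hsz, hcnt] at hle
    simp only [measure3, hsz, hcnt, List.length_append, List.length_cons, List.length_nil]
    omega
  · rfl

theorem foldl_relax_measure (n m j : Int) (maze : List (List String)) (x y s : Int)
    (ds : List (Int × Int)) (acc : List (List (List Bool)) × List (Int × Int × Int)) :
    measure3 (ds.foldl (relax n m j maze x y s) acc) = measure3 acc := by
  induction ds generalizing acc with
  | nil => rfl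
  | cons d t ih => rw [List.foldl_cons, ih, relax_measure]

def bfs (n m j : Int) (maze : List (List String))
    (v : List (List (List Bool))) (q : List (Int × Int × Int)) : String :=
  match q with
  | [] => "IMPOSSIBLE"
  | (x, y, s) :: rest =>
    if cellAt maze x y = "x" then "SUCCESS"
    else
      let r := dirList.foldl (relax n m j maze x y s) (v, [])
      bfs n m j maze r.1 (rest ++ r.2)
termination_by (sz3 v - cnt3 v) + q.length
decreasing_by
  have h := foldl_relax_measure n m j maze x y s dirList (v, [])
  simp [measure3] at h
  simp [List.length_append]
  omega

def initA (n m j : Int) (maze : List (List String)) :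
    List (List (List Bool)) × List (Int × Int × Int) :=
  let v0 := (PySem.List.pyRange 0 n 1).map (fun _ =>
    (PySem.List.pyRange 0 m 1).map (fun _ => List.replicate (j + 1).toNat false))
  (PySem.List.pyRange 0 n 1).foldl (fun acc i =>
    (PySem.List.pyRange 0 m 1).foldl (fun acc2 k =>
      if cellAt maze i k = "@" then (set3 acc2.1 i k 0 true, acc2.2 ++ [(i, k, 0)])
      else acc2) acc) (v0, [])

def solve (n : Int) (m : Int) (j : Int) (maze : List (List String)) : String :=
  bfs n m j maze (initA n m j maze).1 (initA n m j maze).2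

-- B-side
def startsB (n m : Int) (maze : List (List String)) : List (Int × Int × Int) :=
  (PySem.List.pyRange 0 n 1).foldl (fun st r =>
    (PySem.List.pyRange 0 m 1).foldl (fun st2 c =>
      if cellAt maze r c = "@" then PySem.Set.add st2 (r, c, 0) else st2) st) []

def stepB (n m j : Int) (maze : List (List String)) (st : List (Int × Int × Int)) :
    List (Int × Int × Int) :=
  st.foldl (fun nw σ =>
    dirList.foldl (fun nw2 d =>
      let nx := σ.1 + d.1
      let ny := σ.2.1 + d.2
      if 0 ≤ nx ∧ nx < n ∧ 0 ≤ ny ∧ ny < m ∧ cellAt maze nx ny ≠ "#" then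
        if cellAt maze nx ny = "s" then
          (if σ.2.2 < j then PySem.Set.add nw2 (nx, ny, σ.2.2 + 1) else nw2)
        else PySem.Set.add nw2 (nx, ny, σ.2.2)
      else nw2) nw) (PySem.Set.ofList st)

def iterB (n m j : Int) (maze : List (List String)) :
    Nat → List (Int × Int × Int) → List (Int × Int × Int)
  | 0, st => st
  | t + 1, st =>
    if PySem.Set.equal (stepB n m j maze st) st then st
    else iterB n m j maze t (stepB n m j maze st)

def solve_alt (n : Int) (m : Int) (j : Int) (maze : List (List String)) : String :=
  if (iterB n m j maze (n * m * (j + 1)).toNat (startsB n m maze)).any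
      (fun σ => cellAt maze σ.1 σ.2.1 == "x") then "SUCCESS" else "IMPOSSIBLE"



-- ===== PRECONDITION & SPEC =====
-- Pre_solve excludes exactly the inputs where the Python A raises:
-- IndexError from maze[i][k] when the n×m scan walks off the maze (too few rows /
-- a row shorter than m), and IndexError from visited[i][k][0] when j < 0 while
-- some '@' cell exists.
def Pre_solve (n : Int) (m : Int) (j : Int) (maze : List (List String)) : Prop :=
  (0 < n → 0 < m → n.toNat ≤ maze.length ∧ ∀ row ∈ maze.take n.toNat, m.toNat ≤ row.length) ∧
  (j < 0 → ∀ i ∈ PySem.List.pyRange 0 n 1, ∀ k ∈ PySem.List.pyRange 0 m 1,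
    cellAt maze i k ≠ "@")
instance (n : Int) (m : Int) (j : Int) (maze : List (List String)) : Decidable (Pre_solve n m j maze) := by unfold Pre_solve; infer_instance

def pvWitness_solve : Int × Int × Int × List (List String) :=
  (2, 2, 1, [["@", "s"], ["#", "x"]])

def Spec_solve (n : Int) (m : Int) (j : Int) (maze : List (List String)) (out : String) : Prop := out = solve_alt n m j maze
instance (n : Int) (m : Int) (j : Int) (maze : List (List String)) (out : String) : Decidable (Spec_solve n m j maze out) := by unfold Spec_solve; infer_instance

-- ===== CLAIM (what is proved, stated in full; the proofs are below) =====
def Claim_equal_solve : Prop := ∀ (n : Int) (m : Int) (j : Int) (maze : List (List String)), Dom_solve n m j maze → Pre_solve n m j maze → Spec_solve n m j maze (solve n m j maze)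

-- ===== LEMMAS AND PROOFS =====
-- spec-side definitions (used only by the proofs)
def canonSt (n m j : Int) (σ : Int × Int × Int) : Prop :=
  0 ≤ σ.1 ∧ σ.1 < n ∧ 0 ≤ σ.2.1 ∧ σ.2.1 < m ∧ 0 ≤ σ.2.2 ∧ σ.2.2 ≤ j

def isStart (n m : Int) (maze : List (List String)) (σ : Int × Int × Int) : Prop :=
  0 ≤ σ.1 ∧ σ.1 < n ∧ 0 ≤ σ.2.1 ∧ σ.2.1 < m ∧ σ.2.2 = 0 ∧ cellAt maze σ.1 σ.2.1 = "@"

def AdjD (n m j : Int) (maze : List (List String)) (ds : List (Int × Int))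
    (σ τ : Int × Int × Int) : Prop :=
  ∃ d ∈ ds, τ.1 = σ.1 + d.1 ∧ τ.2.1 = σ.2.1 + d.2 ∧
    0 ≤ τ.1 ∧ τ.1 < n ∧ 0 ≤ τ.2.1 ∧ τ.2.1 < m ∧ cellAt maze τ.1 τ.2.1 ≠ "#" ∧
    ((cellAt maze τ.1 τ.2.1 = "s" ∧ σ.2.2 < j ∧ τ.2.2 = σ.2.2 + 1) ∨
     (cellAt maze τ.1 τ.2.1 ≠ "s" ∧ τ.2.2 = σ.2.2))

inductive Reach (n m j : Int) (maze : List (List String)) : (Int × Int × Int) → Prop where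
  | start (σ : Int × Int × Int) : isStart n m maze σ → Reach n m j maze σ
  | step (σ τ : Int × Int × Int) : Reach n m j maze σ → AdjD n m j maze dirList σ τ →
      Reach n m j maze τ

def shape3 (n m j : Int) (v : List (List (List Bool))) : Prop :=
  v.length = n.toNat ∧ ∀ r ∈ v, r.length = m.toNat ∧ ∀ c ∈ r, c.length = (j + 1).toNat

def marked (v : List (List (List Bool))) (σ : Int × Int × Int) : Prop :=
  get3 v σ.1 σ.2.1 σ.2.2 = true

-- ======== small facts ========
theorem adj_canon {n m j : Int} {maze : List (List String)} {ds : List (Int × Int)}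
    {σ τ : Int × Int × Int} (hσ : 0 ≤ σ.2.2 ∧ σ.2.2 ≤ j) (h : AdjD n m j maze ds σ τ) :
    canonSt n m j τ := by
  obtain ⟨d, _, _, _, h1, h2, h3, h4, _, h5⟩ := h
  rcases h5 with ⟨_, hlt, he⟩ | ⟨_, he⟩ <;>
    exact ⟨h1, h2, h3, h4, by omega, by omega⟩

theorem start_canon {n m j : Int} {maze : List (List String)} {σ : Int × Int × Int}
    (hj : 0 ≤ j) (h : isStart n m maze σ) : canonSt n m j σ := by
  obtain ⟨h1, h2, h3, h4, h5, _⟩ := h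
  exact ⟨h1, h2, h3, h4, by omega, by omega⟩

theorem reach_canon {n m j : Int} {maze : List (List String)} {σ : Int × Int × Int}
    (hj : 0 ≤ j) (h : Reach n m j maze σ) : canonSt n m j σ := by
  induction h with
  | start σ h => exact start_canon hj h
  | step σ τ _ hadj ih => exact adj_canon ⟨ih.2.2.2.2.1, ih.2.2.2.2.2⟩ hadj

theorem pyGetD_toNat {α : Type} (xs : List α) (i : Int) (d : α) (h : 0 ≤ i) :
    PySem.List.pyGetD xs i d = xs.getD i.toNat d := by
  unfold PySem.List.pyGetD
  rw [PySem.List.pyGet?_of_nonneg xs h]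
  rfl

theorem getD_set_ite {α : Type} (xs : List α) (a b : Nat) (v d : α) :
    (xs.set a v).getD b d = if b = a ∧ a < xs.length then v else xs.getD b d := by
  simp [List.getD, List.getElem?_set]
  split_ifs with h1 h2 h3 <;> simp_all

-- get3 and set3 for nonneg indices
theorem get3_nonneg (v : List (List (List Bool))) (i k s : Int)
    (hi : 0 ≤ i) (hk : 0 ≤ k) (hs : 0 ≤ s) :
    get3 v i k s = ((v.getD i.toNat []).getD k.toNat []).getD s.toNat true := by
  unfold get3
  rw [pyGetD_toNat v i [] hi, pyGetD_toNat _ k [] hk, pyGetD_toNat _ s true hs]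

theorem set3_nonneg (v : List (List (List Bool))) (i k s : Int) (b : Bool)
    (hi : 0 ≤ i) (hk : 0 ≤ k) (hs : 0 ≤ s) :
    set3 v i k s b =
      v.set i.toNat ((v.getD i.toNat []).set k.toNat
        (((v.getD i.toNat []).getD k.toNat []).set s.toNat b)) := by
  unfold set3
  rw [pyGetD_toNat v i [] hi, pyGetD_toNat _ k [] hk,
      PySem.List.pySetD_of_nonneg _ _ hs, PySem.List.pySetD_of_nonneg _ _ hk,
      PySem.List.pySetD_of_nonneg _ _ hi]

theorem shape3_set3 {n m j : Int} {v : List (List (List Bool))} (hsh : shape3 n m j v)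
    {τ : Int × Int × Int} (hτ : canonSt n m j τ) (b : Bool) :
    shape3 n m j (set3 v τ.1 τ.2.1 τ.2.2 b) := by
  obtain ⟨h1, h2, h3, h4, h5, h6⟩ := hτ
  obtain ⟨hlen, hrows⟩ := hsh
  rw [set3_nonneg v τ.1 τ.2.1 τ.2.2 b h1 h3 h5]
  have hil : τ.1.toNat < v.length := by omega
  have hrow_mem : v.getD τ.1.toNat [] ∈ v := by
    rw [List.getD_eq_getElem _ _ hil]; exact List.getElem_mem hil
  obtain ⟨hrl, hcols⟩ := hrows _ hrow_mem
  have hkl : τ.2.1.toNat < (v.getD τ.1.toNat []).length := by omega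
  have hcol_mem : (v.getD τ.1.toNat []).getD τ.2.1.toNat [] ∈ v.getD τ.1.toNat [] := by
    rw [List.getD_eq_getElem _ _ hkl]; exact List.getElem_mem hkl
  refine ⟨by simpa using hlen, ?_⟩
  intro r hr
  rcases List.mem_or_eq_of_mem_set hr with hmem | heq
  · exact hrows r hmem
  · subst heq
    refine ⟨by simpa using hrl, ?_⟩
    intro c hc
    rcases List.mem_or_eq_of_mem_set hc with hcm | hce
    · exact hcols c hcm
    · subst hce
      simpa using hcols _ hcol_mem

theorem marked_set3 {n m j : Int} {v : List (List (List Bool))} (hsh : shape3 n m j v)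
    {τ σ : Int × Int × Int} (hτ : canonSt n m j τ) (hσ : canonSt n m j σ) (b : Bool) :
    marked (set3 v τ.1 τ.2.1 τ.2.2 b) σ ↔ (if σ = τ then b = true else marked v σ) := by
  obtain ⟨t1, t2, t3, t4, t5, t6⟩ := hτ
  obtain ⟨p1, p2, p3, p4, p5, p6⟩ := hσ
  obtain ⟨hlen, hrows⟩ := hsh
  have hil : τ.1.toNat < v.length := by omega
  have hrow_mem : v.getD τ.1.toNat [] ∈ v := by
    rw [List.getD_eq_getElem _ _ hil]; exact List.getElem_mem hil
  obtain ⟨hrl, hcols⟩ := hrows _ hrow_mem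
  have hkl : τ.2.1.toNat < (v.getD τ.1.toNat []).length := by omega
  have hcol_mem : (v.getD τ.1.toNat []).getD τ.2.1.toNat [] ∈ v.getD τ.1.toNat [] := by
    rw [List.getD_eq_getElem _ _ hkl]; exact List.getElem_mem hkl
  have hcl := hcols _ hcol_mem
  have hsl : τ.2.2.toNat < ((v.getD τ.1.toNat []).getD τ.2.1.toNat []).length := by omega
  unfold marked
  rw [set3_nonneg v τ.1 τ.2.1 τ.2.2 b t1 t3 t5, get3_nonneg _ _ _ _ p1 p3 p5,
      get3_nonneg v _ _ _ p1 p3 p5]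
  rw [getD_set_ite]
  by_cases e1 : σ.1.toNat = τ.1.toNat
  · have e1' : σ.1 = τ.1 := by omega
    rw [if_pos (And.intro e1 hil), getD_set_ite]
    by_cases e2 : σ.2.1.toNat = τ.2.1.toNat
    · have e2' : σ.2.1 = τ.2.1 := by omega
      rw [if_pos (And.intro e2 hkl), getD_set_ite]
      by_cases e3 : σ.2.2.toNat = τ.2.2.toNat
      · have e3' : σ.2.2 = τ.2.2 := by omega
        have : σ = τ := by
          apply Prod.ext e1'; apply Prod.ext e2' e3'
        rw [if_pos (And.intro e3 hsl), if_pos this]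
      · have hne : σ ≠ τ := by
          intro he; rw [he] at e3; exact e3 rfl
        rw [if_neg (fun hc => e3 hc.1), if_neg hne, e1', e2']
    · have hne : σ ≠ τ := by
        intro he; rw [he] at e2; exact e2 rfl
      rw [if_neg (fun hc => e2 hc.1), if_neg hne, e1']
  · have hne : σ ≠ τ := by
      intro he; rw [he] at e1; exact e1 rfl
    rw [if_neg (fun hc => e1 hc.1), if_neg hne]
theorem marked_set3_true {n m j : Int} {v : List (List (List Bool))} (hsh : shape3 n m j v)
    {τ σ : Int × Int × Int} (hτ : canonSt n m j τ) (hσ : canonSt n m j σ) :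
    marked (set3 v τ.1 τ.2.1 τ.2.2 true) σ ↔ (marked v σ ∨ σ = τ) := by
  rw [marked_set3 hsh hτ hσ]
  split_ifs with h <;> simp [h]

theorem adjD_cons {n m j : Int} {maze : List (List String)} {d : Int × Int}
    {ds : List (Int × Int)} {σ τ : Int × Int × Int} :
    AdjD n m j maze (d :: ds) σ τ ↔ AdjD n m j maze [d] σ τ ∨ AdjD n m j maze ds σ τ := by
  unfold AdjD
  constructor
  · rintro ⟨d', hd', hrest⟩
    rcases List.mem_cons.mp hd' with he | hm
    · exact Or.inl ⟨d', by simp [he], hrest⟩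
    · exact Or.inr ⟨d', hm, hrest⟩
  · rintro (⟨d', hd', hrest⟩ | ⟨d', hd', hrest⟩)
    · have : d' = d := by simpa using hd'
      exact ⟨d', by simp [this], hrest⟩
    · exact ⟨d', List.mem_cons_of_mem d hd', hrest⟩

theorem adjD_nil {n m j : Int} {maze : List (List String)} {σ τ : Int × Int × Int} :
    ¬ AdjD n m j maze [] σ τ := by
  rintro ⟨d, hd, _⟩; simp at hd

theorem relax_char (n m j : Int) (maze : List (List String)) (x y s : Int)
    (acc : List (List (List Bool)) × List (Int × Int × Int)) (d : Int × Int)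
    (hsh : shape3 n m j acc.1) (hx : canonSt n m j (x, y, s)) :
    shape3 n m j (relax n m j maze x y s acc d).1 ∧
    ∃ extra, (relax n m j maze x y s acc d).2 = acc.2 ++ extra ∧
      (∀ τ ∈ extra, AdjD n m j maze [d] (x, y, s) τ) ∧
      (∀ τ, canonSt n m j τ →
        (marked (relax n m j maze x y s acc d).1 τ ↔ marked acc.1 τ ∨ τ ∈ extra)) ∧
      (∀ τ, AdjD n m j maze [d] (x, y, s) τ → marked (relax n m j maze x y s acc d).1 τ) := by
  obtain ⟨c1, c2, c3, c4, c5, c6⟩ :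
      0 ≤ x ∧ x < n ∧ 0 ≤ y ∧ y < m ∧ 0 ≤ s ∧ s ≤ j := hx
  unfold relax
  dsimp only
  split_ifs with h1 h2 h3 h4
  · refine ⟨hsh, [], by simp, by simp, fun τ _ => by simp, ?_⟩
    rintro τ ⟨d', hd', ht1, ht2, hb1, hb2, hb3, hb4, _⟩
    obtain rfl : d = d' := by symm; simpa using hd'
    have ht1' : τ.1 = x + d.1 := ht1
    have ht2' : τ.2.1 = y + d.2 := ht2
    omega
  · refine ⟨hsh, [], by simp, by simp, fun τ _ => by simp, ?_⟩
    rintro τ ⟨d', hd', ht1, ht2, hb1, hb2, hb3, hb4, hnw, _⟩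
    obtain rfl : d = d' := by symm; simpa using hd'
    have ht1' : τ.1 = x + d.1 := ht1
    have ht2' : τ.2.1 = y + d.2 := ht2
    rw [ht1', ht2'] at hnw
    exact (hnw h2).elim
  · -- 's' branch: mark (x+d.1, y+d.2, s+1)
    obtain ⟨hcs, hsj, hget⟩ := h3
    have hc0 : 0 ≤ x + d.1 ∧ x + d.1 < n ∧ 0 ≤ y + d.2 ∧ y + d.2 < m ∧
        0 ≤ s + 1 ∧ s + 1 ≤ j := by omega
    have hτ0 : canonSt n m j (x + d.1, y + d.2, s + 1) := hc0
    have hAdj0 : AdjD n m j maze [d] (x, y, s) (x + d.1, y + d.2, s + 1) :=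
      ⟨d, by simp, rfl, rfl, hc0.1, hc0.2.1, hc0.2.2.1, hc0.2.2.2.1,
        fun hc => absurd (hcs.symm.trans hc) (by decide),
        Or.inl ⟨hcs, hsj, rfl⟩⟩
    refine ⟨shape3_set3 hsh hτ0 true, [(x + d.1, y + d.2, s + 1)], by simp, ?_, ?_, ?_⟩
    · intro τ hτ
      have : τ = (x + d.1, y + d.2, s + 1) := by simpa using hτ
      subst this; exact hAdj0
    · intro τ hτc
      rw [marked_set3_true hsh hτ0 hτc]
      simp
    · rintro τ ⟨d', hd', ht1, ht2, hb1, hb2, hb3, hb4, hnw, hor⟩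
      obtain rfl : d = d' := by symm; simpa using hd'
      have ht1' : τ.1 = x + d.1 := ht1
      have ht2' : τ.2.1 = y + d.2 := ht2
      have hτeq : τ = (x + d.1, y + d.2, s + 1) := by
        rcases hor with ⟨_, _, h3'⟩ | ⟨hns, _⟩
        · have h3'' : τ.2.2 = s + 1 := h3'
          exact Prod.ext ht1' (Prod.ext ht2' h3'')
        · rw [ht1', ht2'] at hns; exact absurd hcs hns
      have hτc : canonSt n m j τ := hτeq ▸ hτ0
      rw [marked_set3_true hsh hτ0 hτc]
      exact Or.inr hτeq
  · -- non-'s' branch: mark (x+d.1, y+d.2, s)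
    obtain ⟨hcs, hget⟩ := h4
    have hc0 : 0 ≤ x + d.1 ∧ x + d.1 < n ∧ 0 ≤ y + d.2 ∧ y + d.2 < m ∧
        0 ≤ s ∧ s ≤ j := by omega
    have hτ0 : canonSt n m j (x + d.1, y + d.2, s) := hc0
    have hAdj0 : AdjD n m j maze [d] (x, y, s) (x + d.1, y + d.2, s) :=
      ⟨d, by simp, rfl, rfl, hc0.1, hc0.2.1, hc0.2.2.1, hc0.2.2.2.1,
        fun hc => h2 hc, Or.inr ⟨hcs, rfl⟩⟩
    refine ⟨shape3_set3 hsh hτ0 true, [(x + d.1, y + d.2, s)], by simp, ?_, ?_, ?_⟩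
    · intro τ hτ
      have : τ = (x + d.1, y + d.2, s) := by simpa using hτ
      subst this; exact hAdj0
    · intro τ hτc
      rw [marked_set3_true hsh hτ0 hτc]
      simp
    · rintro τ ⟨d', hd', ht1, ht2, hb1, hb2, hb3, hb4, hnw, hor⟩
      obtain rfl : d = d' := by symm; simpa using hd'
      have ht1' : τ.1 = x + d.1 := ht1
      have ht2' : τ.2.1 = y + d.2 := ht2
      have hτeq : τ = (x + d.1, y + d.2, s) := by
        rcases hor with ⟨hs', _, _⟩ | ⟨_, h3'⟩
        · rw [ht1', ht2'] at hs'; exact absurd hs' hcs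
        · have h3'' : τ.2.2 = s := h3'
          exact Prod.ext ht1' (Prod.ext ht2' h3'')
      have hτc : canonSt n m j τ := hτeq ▸ hτ0
      rw [marked_set3_true hsh hτ0 hτc]
      exact Or.inr hτeq
  · -- already marked / budget branch: no change
    refine ⟨hsh, [], by simp, by simp, fun τ _ => by simp, ?_⟩
    rintro τ ⟨d', hd', ht1, ht2, hb1, hb2, hb3, hb4, hnw, hor⟩
    obtain rfl : d = d' := by symm; simpa using hd'
    have ht1' : τ.1 = x + d.1 := ht1
    have ht2' : τ.2.1 = y + d.2 := ht2
    rcases hor with ⟨hs', hsj, h3'⟩ | ⟨hns, h3'⟩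
    · rw [ht1', ht2'] at hs'
      have hsj' : s < j := hsj
      have h3'' : τ.2.2 = s + 1 := h3'
      have hm : get3 acc.1 (x + d.1) (y + d.2) (s + 1) = true := by
        by_contra hc
        exact h3 ⟨hs', hsj', by simpa using hc⟩
      unfold marked
      rw [ht1', ht2', h3'']
      exact hm
    · rw [ht1', ht2'] at hns
      have h3'' : τ.2.2 = s := h3'
      have hm : get3 acc.1 (x + d.1) (y + d.2) s = true := by
        by_contra hc
        exact h4 ⟨hns, by simpa using hc⟩
      unfold marked
      rw [ht1', ht2', h3'']
      exact hm

theorem relax_fold_char (n m j : Int) (maze : List (List String)) (x y s : Int) :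
    ∀ (ds : List (Int × Int)) (acc : List (List (List Bool)) × List (Int × Int × Int)),
    shape3 n m j acc.1 → canonSt n m j (x, y, s) →
    shape3 n m j (ds.foldl (relax n m j maze x y s) acc).1 ∧
    ∃ extra, (ds.foldl (relax n m j maze x y s) acc).2 = acc.2 ++ extra ∧
      (∀ τ ∈ extra, AdjD n m j maze ds (x, y, s) τ) ∧
      (∀ τ, canonSt n m j τ →
        (marked (ds.foldl (relax n m j maze x y s) acc).1 τ ↔ marked acc.1 τ ∨ τ ∈ extra)) ∧
      (∀ τ, AdjD n m j maze ds (x, y, s) τ →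
        marked (ds.foldl (relax n m j maze x y s) acc).1 τ) := by
  intro ds
  induction ds with
  | nil =>
    intro acc hsh hx
    exact ⟨hsh, [], by simp, by simp, fun τ _ => by simp, fun τ h => (adjD_nil h).elim⟩
  | cons d ds ih =>
    intro acc hsh hx
    rw [List.foldl_cons]
    obtain ⟨hsh1, e1, hq1, he1, hm1, ha1⟩ := relax_char n m j maze x y s acc d hsh hx
    obtain ⟨hsh2, e2, hq2, he2, hm2, ha2⟩ := ih (relax n m j maze x y s acc d) hsh1 hx
    refine ⟨hsh2, e1 ++ e2, by rw [hq2, hq1, List.append_assoc], ?_, ?_, ?_⟩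
    · intro τ hτ
      rcases List.mem_append.mp hτ with h | h
      · exact adjD_cons.mpr (Or.inl (he1 τ h))
      · exact adjD_cons.mpr (Or.inr (he2 τ h))
    · intro τ hτc
      rw [hm2 τ hτc, hm1 τ hτc, List.mem_append]
      tauto
    · intro τ hadj
      rcases adjD_cons.mp hadj with h | h
      · have hmk := ha1 τ h
        have hτc : canonSt n m j τ := adj_canon ⟨hx.2.2.2.2.1, hx.2.2.2.2.2⟩ h
        exact (hm2 τ hτc).mpr (Or.inl hmk)
      · exact ha2 τ h

theorem bfs_cases (n m j : Int) (maze : List (List String))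
    (v : List (List (List Bool))) (q : List (Int × Int × Int)) :
    bfs n m j maze v q = "SUCCESS" ∨ bfs n m j maze v q = "IMPOSSIBLE" := by
  induction v, q using bfs.induct n m j maze with
  | case1 v => right; simp [bfs]
  | case2 v x y s rest hx => left; unfold bfs; rw [if_pos hx]
  | case3 v x y s rest hx r ih => unfold bfs; rw [if_neg hx]; exact ih

theorem bfs_sound (n m j : Int) (maze : List (List String))
    (v : List (List (List Bool))) (q : List (Int × Int × Int)) :
    shape3 n m j v →
    (∀ σ ∈ q, canonSt n m j σ ∧ Reach n m j maze σ) →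
    bfs n m j maze v q = "SUCCESS" →
    ∃ σ, Reach n m j maze σ ∧ cellAt maze σ.1 σ.2.1 = "x" := by
  induction v, q using bfs.induct n m j maze with
  | case1 v => intro _ _ hres; simp [bfs] at hres
  | case2 v x y s rest hx =>
    intro hsh hq hres
    exact ⟨(x, y, s), (hq (x, y, s) List.mem_cons_self).2, hx⟩
  | case3 v x y s rest hx r ih =>
    intro hsh hq hres
    unfold bfs at hres
    rw [if_neg hx] at hres
    have hhead := hq (x, y, s) List.mem_cons_self
    obtain ⟨hsh', extra, hq', he', hm', ha'⟩ :=
      relax_fold_char n m j maze x y s dirList (v, []) hsh hhead.1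
    apply ih hsh' _ hres
    intro σ hσ
    rw [hq'] at hσ
    simp only [List.nil_append] at hσ
    rcases List.mem_append.mp hσ with h | h
    · exact hq σ (List.mem_cons_of_mem _ h)
    · have hadj := he' σ h
      exact ⟨adj_canon ⟨hhead.1.2.2.2.2.1, hhead.1.2.2.2.2.2⟩ hadj,
        Reach.step _ _ hhead.2 hadj⟩

theorem bfs_complete (n m j : Int) (maze : List (List String)) (hj : 0 ≤ j)
    (v : List (List (List Bool))) (q : List (Int × Int × Int)) :
    shape3 n m j v →
    (∀ σ ∈ q, canonSt n m j σ ∧ marked v σ) →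
    (∀ σ, isStart n m maze σ → marked v σ) →
    (∀ σ, canonSt n m j σ → marked v σ → σ ∉ q →
      cellAt maze σ.1 σ.2.1 ≠ "x" ∧ ∀ τ, AdjD n m j maze dirList σ τ → marked v τ) →
    bfs n m j maze v q = "IMPOSSIBLE" →
    ∀ σ, Reach n m j maze σ → cellAt maze σ.1 σ.2.1 ≠ "x" := by
  induction v, q using bfs.induct n m j maze with
  | case1 v =>
    intro hsh hq hst hproc hres
    have hmk : ∀ σ, Reach n m j maze σ → marked v σ := by
      intro σ hr
      induction hr with
      | start σ h => exact hst σ h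
      | step σ τ hr hadj ihr =>
        exact (hproc σ (reach_canon hj hr) ihr (by simp)).2 τ hadj
    intro σ hr
    exact (hproc σ (reach_canon hj hr) (hmk σ hr) (by simp)).1
  | case2 v x y s rest hx =>
    intro hsh hq hst hproc hres
    unfold bfs at hres
    rw [if_pos hx] at hres
    simp at hres
  | case3 v x y s rest hx r ih =>
    intro hsh hq hst hproc hres
    unfold bfs at hres
    rw [if_neg hx] at hres
    have hhead := hq (x, y, s) List.mem_cons_self
    obtain ⟨hsh', extra, hq', he', hm', ha'⟩ :=
      relax_fold_char n m j maze x y s dirList (v, []) hsh hhead.1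
    simp only [List.nil_append] at hq'
    apply ih hsh' ?_ ?_ ?_ hres
    · -- queue invariant
      intro σ hσ
      rw [hq'] at hσ
      rcases List.mem_append.mp hσ with h | h
      · have := hq σ (List.mem_cons_of_mem _ h)
        exact ⟨this.1, (hm' σ this.1).mpr (Or.inl this.2)⟩
      · have hadj := he' σ h
        have hc : canonSt n m j σ := adj_canon ⟨hhead.1.2.2.2.2.1, hhead.1.2.2.2.2.2⟩ hadj
        exact ⟨hc, (hm' σ hc).mpr (Or.inr h)⟩
    · -- starts marked
      intro σ hs
      have hc := start_canon (maze := maze) hj hs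
      exact (hm' σ hc).mpr (Or.inl (hst σ hs))
    · -- processed invariant
      intro σ hc hmσ hnq
      rw [hq'] at hnq
      have hσe : σ ∉ extra := fun h => hnq (List.mem_append.mpr (Or.inr h))
      have hσr : σ ∉ rest := fun h => hnq (List.mem_append.mpr (Or.inl h))
      have hmv : marked v σ := by
        rcases (hm' σ hc).mp hmσ with h | h
        · exact h
        · exact absurd h hσe
      by_cases hh : σ = (x, y, s)
      · subst hh
        refine ⟨hx, ?_⟩
        intro τ hadj
        exact ha' τ hadj
      · have hnq0 : σ ∉ (x, y, s) :: rest := by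
          intro h
          rcases List.mem_cons.mp h with h | h
          · exact hh h
          · exact hσr h
        obtain ⟨hx', hsucc⟩ := hproc σ hc hmv hnq0
        refine ⟨hx', ?_⟩
        intro τ hadj
        have hτc : canonSt n m j τ := adj_canon ⟨hc.2.2.2.2.1, hc.2.2.2.2.2⟩ hadj
        exact (hm' τ hτc).mpr (Or.inl (hsucc τ hadj))

-- initial visited array
theorem shape3_v0 (n m j : Int) :
    shape3 n m j ((PySem.List.pyRange 0 n 1).map (fun _ =>
      (PySem.List.pyRange 0 m 1).map (fun _ => List.replicate (j + 1).toNat false))) := by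
  refine ⟨by simp [PySem.List.length_pyRange_one], ?_⟩
  intro r hr
  obtain ⟨_, _, rfl⟩ := List.mem_map.mp hr
  refine ⟨by simp [PySem.List.length_pyRange_one], ?_⟩
  intro c hc
  obtain ⟨_, _, rfl⟩ := List.mem_map.mp hc
  simp

theorem unmarked_v0 (n m j : Int) (σ : Int × Int × Int) (hc : canonSt n m j σ) :
    ¬ marked ((PySem.List.pyRange 0 n 1).map (fun _ =>
      (PySem.List.pyRange 0 m 1).map (fun _ => List.replicate (j + 1).toNat false))) σ := by
  obtain ⟨c1, c2, c3, c4, c5, c6⟩ := hc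
  unfold marked
  rw [get3_nonneg _ _ _ _ c1 c3 c5]
  have h1 : σ.1.toNat < ((PySem.List.pyRange 0 n 1).map (fun _ =>
      (PySem.List.pyRange 0 m 1).map (fun _ => List.replicate (j + 1).toNat false))).length := by
    simp [PySem.List.length_pyRange_one]; omega
  rw [List.getD_eq_getElem _ _ h1, List.getElem_map]
  have h2 : σ.2.1.toNat < ((PySem.List.pyRange 0 m 1).map
      (fun _ => List.replicate (j + 1).toNat false)).length := by
    simp [PySem.List.length_pyRange_one]; omega
  rw [List.getD_eq_getElem _ _ h2, List.getElem_map]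
  have h3 : σ.2.2.toNat < (List.replicate (j + 1).toNat (false : Bool)).length := by
    simp; omega
  rw [List.getD_eq_getElem _ _ h3, List.getElem_replicate]
  simp

-- init fold characterization
theorem init_inner_char (n m j : Int) (maze : List (List String)) (hj : 0 ≤ j)
    (i : Int) (hi : 0 ≤ i ∧ i < n) :
    ∀ (ks : List Int) (acc : List (List (List Bool)) × List (Int × Int × Int)),
    shape3 n m j acc.1 → (∀ k ∈ ks, 0 ≤ k ∧ k < m) →
    shape3 n m j (ks.foldl (fun acc2 k =>
      if cellAt maze i k = "@" then (set3 acc2.1 i k 0 true, acc2.2 ++ [(i, k, 0)])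
      else acc2) acc).1 ∧
    ∃ extra, (ks.foldl (fun acc2 k =>
      if cellAt maze i k = "@" then (set3 acc2.1 i k 0 true, acc2.2 ++ [(i, k, 0)])
      else acc2) acc).2 = acc.2 ++ extra ∧
      (∀ σ, σ ∈ extra ↔ ∃ k ∈ ks, cellAt maze i k = "@" ∧ σ = (i, k, 0)) ∧
      (∀ σ, canonSt n m j σ → (marked (ks.foldl (fun acc2 k =>
        if cellAt maze i k = "@" then (set3 acc2.1 i k 0 true, acc2.2 ++ [(i, k, 0)])
        else acc2) acc).1 σ ↔ marked acc.1 σ ∨ σ ∈ extra)) := by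
  intro ks
  induction ks with
  | nil =>
    intro acc hsh _
    exact ⟨hsh, [], by simp, by simp, fun σ _ => by simp⟩
  | cons k ks ih =>
    intro acc hsh hks
    rw [List.foldl_cons]
    have hkb := hks k List.mem_cons_self
    by_cases hat : cellAt maze i k = "@"
    · rw [if_pos hat]
      have hcan : canonSt n m j (i, k, 0) :=
        (⟨hi.1, hi.2, hkb.1, hkb.2, le_refl 0, hj⟩ :
          0 ≤ i ∧ i < n ∧ 0 ≤ k ∧ k < m ∧ 0 ≤ (0:Int) ∧ (0:Int) ≤ j)
      have hsh' : shape3 n m j (set3 acc.1 i k 0 true) := shape3_set3 hsh hcan true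
      obtain ⟨hsh2, extra, hq2, he2, hm2⟩ :=
        ih (set3 acc.1 i k 0 true, acc.2 ++ [(i, k, 0)]) hsh'
          (fun k' hk' => hks k' (List.mem_cons_of_mem _ hk'))
      refine ⟨hsh2, (i, k, 0) :: extra, by rw [hq2]; simp, ?_, ?_⟩
      · intro σ
        constructor
        · intro hσ
          rcases List.mem_cons.mp hσ with h | h
          · exact ⟨k, List.mem_cons_self, hat, h⟩
          · obtain ⟨k', hk', hat', he'⟩ := (he2 σ).mp h
            exact ⟨k', List.mem_cons_of_mem _ hk', hat', he'⟩
        · rintro ⟨k', hk', hat', he'⟩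
          rcases List.mem_cons.mp hk' with h | h
          · subst h; simp [he']
          · exact List.mem_cons_of_mem _ ((he2 σ).mpr ⟨k', h, hat', he'⟩)
      · intro σ hσc
        rw [hm2 σ hσc, marked_set3_true hsh hcan hσc]
        simp only [List.mem_cons]
        tauto
    · rw [if_neg hat]
      obtain ⟨hsh2, extra, hq2, he2, hm2⟩ :=
        ih acc hsh (fun k' hk' => hks k' (List.mem_cons_of_mem _ hk'))
      refine ⟨hsh2, extra, hq2, ?_, hm2⟩
      intro σ
      rw [he2 σ]
      constructor
      · rintro ⟨k', hk', hat', he'⟩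
        exact ⟨k', List.mem_cons_of_mem _ hk', hat', he'⟩
      · rintro ⟨k', hk', hat', he'⟩
        rcases List.mem_cons.mp hk' with h | h
        · subst h; exact absurd hat' hat
        · exact ⟨k', h, hat', he'⟩

theorem init_outer_char (n m j : Int) (maze : List (List String)) (hj : 0 ≤ j) :
    ∀ (is : List Int) (acc : List (List (List Bool)) × List (Int × Int × Int)),
    shape3 n m j acc.1 → (∀ i ∈ is, 0 ≤ i ∧ i < n) →
    shape3 n m j (is.foldl (fun acc i => (PySem.List.pyRange 0 m 1).foldl (fun acc2 k =>
      if cellAt maze i k = "@" then (set3 acc2.1 i k 0 true, acc2.2 ++ [(i, k, 0)])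
      else acc2) acc) acc).1 ∧
    ∃ extra, (is.foldl (fun acc i => (PySem.List.pyRange 0 m 1).foldl (fun acc2 k =>
      if cellAt maze i k = "@" then (set3 acc2.1 i k 0 true, acc2.2 ++ [(i, k, 0)])
      else acc2) acc) acc).2 = acc.2 ++ extra ∧
      (∀ σ, σ ∈ extra ↔ ∃ i ∈ is, ∃ k, (0 ≤ k ∧ k < m) ∧ cellAt maze i k = "@" ∧
        σ = (i, k, 0)) ∧
      (∀ σ, canonSt n m j σ → (marked (is.foldl (fun acc i =>
        (PySem.List.pyRange 0 m 1).foldl (fun acc2 k =>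
        if cellAt maze i k = "@" then (set3 acc2.1 i k 0 true, acc2.2 ++ [(i, k, 0)])
        else acc2) acc) acc).1 σ ↔ marked acc.1 σ ∨ σ ∈ extra)) := by
  intro is
  induction is with
  | nil =>
    intro acc hsh _
    exact ⟨hsh, [], by simp, by simp, fun σ _ => by simp⟩
  | cons i is ih =>
    intro acc hsh his
    rw [List.foldl_cons]
    have hib := his i List.mem_cons_self
    obtain ⟨hsh1, e1, hq1, he1, hm1⟩ :=
      init_inner_char n m j maze hj i hib (PySem.List.pyRange 0 m 1) acc hsh
        (fun k hk => PySem.List.mem_pyRange_one.mp hk)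
    obtain ⟨hsh2, e2, hq2, he2, hm2⟩ :=
      ih _ hsh1 (fun i' hi' => his i' (List.mem_cons_of_mem _ hi'))
    refine ⟨hsh2, e1 ++ e2, by rw [hq2, hq1, List.append_assoc], ?_, ?_⟩
    · intro σ
      rw [List.mem_append, he1 σ, he2 σ]
      constructor
      · rintro (⟨k, hk, hat, he⟩ | ⟨i', hi', k, hk, hat, he⟩)
        · exact ⟨i, List.mem_cons_self, k, PySem.List.mem_pyRange_one.mp hk, hat, he⟩
        · exact ⟨i', List.mem_cons_of_mem _ hi', k, hk, hat, he⟩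
      · rintro ⟨i', hi', k, hk, hat, he⟩
        rcases List.mem_cons.mp hi' with h | h
        · subst h
          exact Or.inl ⟨k, PySem.List.mem_pyRange_one.mpr hk, hat, he⟩
        · exact Or.inr ⟨i', h, k, hk, hat, he⟩
    · intro σ hσc
      rw [hm2 σ hσc, hm1 σ hσc, List.mem_append]
      tauto

theorem initA_char (n m j : Int) (maze : List (List String)) (hj : 0 ≤ j) :
    shape3 n m j (initA n m j maze).1 ∧
    (∀ σ, σ ∈ (initA n m j maze).2 ↔ isStart n m maze σ) ∧
    (∀ σ, canonSt n m j σ → (marked (initA n m j maze).1 σ ↔ isStart n m maze σ)) := by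
  unfold initA
  dsimp only
  obtain ⟨hsh, extra, hq, he, hm⟩ :=
    init_outer_char n m j maze hj (PySem.List.pyRange 0 n 1)
      ((PySem.List.pyRange 0 n 1).map (fun _ =>
        (PySem.List.pyRange 0 m 1).map (fun _ => List.replicate (j + 1).toNat false)), [])
      (shape3_v0 n m j) (fun i hi => PySem.List.mem_pyRange_one.mp hi)
  have hstart : ∀ σ, (∃ i ∈ PySem.List.pyRange 0 n 1, ∃ k, (0 ≤ k ∧ k < m) ∧
      cellAt maze i k = "@" ∧ σ = (i, k, 0)) ↔ isStart n m maze σ := by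
    intro σ
    constructor
    · rintro ⟨i, hi, k, hk, hat, rfl⟩
      have hib := PySem.List.mem_pyRange_one.mp hi
      exact ⟨hib.1, hib.2, hk.1, hk.2, rfl, hat⟩
    · rintro ⟨h1, h2, h3, h4, h5, h6⟩
      refine ⟨σ.1, PySem.List.mem_pyRange_one.mpr ⟨h1, h2⟩, σ.2.1, ⟨h3, h4⟩, h6, ?_⟩
      have h2eq : σ.2 = (σ.2.1, 0) := Prod.ext rfl h5
      exact Prod.ext rfl h2eq
  refine ⟨hsh, ?_, ?_⟩
  · intro σ
    rw [hq]
    simp only [List.nil_append]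
    rw [he σ, hstart σ]
  · intro σ hσc
    rw [hm σ hσc, he σ, hstart σ]
    have := unmarked_v0 n m j σ hσc
    tauto

theorem init_queue_noat (n m j : Int) (maze : List (List String))
    (hno : ∀ i, 0 ≤ i → i < n → ∀ k, 0 ≤ k → k < m → cellAt maze i k ≠ "@") :
    (initA n m j maze).2 = [] := by
  unfold initA
  dsimp only
  have inner : ∀ (i : Int), 0 ≤ i → i < n →
      ∀ (acc : List (List (List Bool)) × List (Int × Int × Int)),
      (PySem.List.pyRange 0 m 1).foldl (fun acc2 k =>
        if cellAt maze i k = "@" then (set3 acc2.1 i k 0 true, acc2.2 ++ [(i, k, 0)])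
        else acc2) acc = acc := by
    intro i hi1 hi2 acc
    have : ∀ (ks : List Int), (∀ k ∈ ks, 0 ≤ k ∧ k < m) → ks.foldl (fun acc2 k =>
        if cellAt maze i k = "@" then (set3 acc2.1 i k 0 true, acc2.2 ++ [(i, k, 0)])
        else acc2) acc = acc := by
      intro ks
      induction ks with
      | nil => intro _; rfl
      | cons k ks ihk =>
        intro hks
        have hkb := hks k List.mem_cons_self
        rw [List.foldl_cons, if_neg (hno i hi1 hi2 k hkb.1 hkb.2)]
        exact ihk (fun k' hk' => hks k' (List.mem_cons_of_mem _ hk'))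
    exact this _ (fun k hk => PySem.List.mem_pyRange_one.mp hk)
  have : ∀ (is : List Int), (∀ i ∈ is, 0 ≤ i ∧ i < n) →
      ∀ (acc : List (List (List Bool)) × List (Int × Int × Int)),
      is.foldl (fun acc i => (PySem.List.pyRange 0 m 1).foldl (fun acc2 k =>
        if cellAt maze i k = "@" then (set3 acc2.1 i k 0 true, acc2.2 ++ [(i, k, 0)])
        else acc2) acc) acc = acc := by
    intro is
    induction is with
    | nil => intro _ _; rfl
    | cons i is ihi =>
      intro his acc
      have hib := his i List.mem_cons_self
      rw [List.foldl_cons, inner i hib.1 hib.2]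
      exact ihi (fun i' hi' => his i' (List.mem_cons_of_mem _ hi')) acc
  rw [this _ (fun i hi => PySem.List.mem_pyRange_one.mp hi)]

-- ===== B-side lemmas =====
theorem startsB_inner (n m : Int) (maze : List (List String)) (i : Int) :
    ∀ (ks : List Int) (st : List (Int × Int × Int)),
    (∀ σ, σ ∈ ks.foldl (fun st2 c =>
        if cellAt maze i c = "@" then PySem.Set.add st2 (i, c, 0) else st2) st ↔
      σ ∈ st ∨ ∃ k ∈ ks, cellAt maze i k = "@" ∧ σ = (i, k, 0)) ∧
    (st.Nodup → (ks.foldl (fun st2 c =>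
        if cellAt maze i c = "@" then PySem.Set.add st2 (i, c, 0) else st2) st).Nodup) := by
  intro ks
  induction ks with
  | nil => intro st; exact ⟨fun σ => by simp, fun h => h⟩
  | cons k ks ih =>
    intro st
    rw [List.foldl_cons]
    by_cases hat : cellAt maze i k = "@"
    · rw [if_pos hat]
      obtain ⟨hmem, hnd⟩ := ih (PySem.Set.add st (i, k, 0))
      constructor
      · intro σ
        rw [hmem σ, PySem.Set.mem_add]
        constructor
        · rintro ((h | h) | ⟨k', hk', hat', he'⟩)
          · exact Or.inl h
          · exact Or.inr ⟨k, List.mem_cons_self, hat, h⟩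
          · exact Or.inr ⟨k', List.mem_cons_of_mem _ hk', hat', he'⟩
        · rintro (h | ⟨k', hk', hat', he'⟩)
          · exact Or.inl (Or.inl h)
          · rcases List.mem_cons.mp hk' with h | h
            · subst h; exact Or.inl (Or.inr he')
            · exact Or.inr ⟨k', h, hat', he'⟩
      · intro hst
        exact hnd (PySem.Set.nodup_add st _ hst)
    · rw [if_neg hat]
      obtain ⟨hmem, hnd⟩ := ih st
      refine ⟨?_, hnd⟩
      intro σ
      rw [hmem σ]
      constructor
      · rintro (h | ⟨k', hk', hat', he'⟩)
        · exact Or.inl h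
        · exact Or.inr ⟨k', List.mem_cons_of_mem _ hk', hat', he'⟩
      · rintro (h | ⟨k', hk', hat', he'⟩)
        · exact Or.inl h
        · rcases List.mem_cons.mp hk' with h | h
          · subst h; exact absurd hat' hat
          · exact Or.inr ⟨k', h, hat', he'⟩

theorem startsB_char (n m : Int) (maze : List (List String)) :
    (∀ σ, σ ∈ startsB n m maze ↔ isStart n m maze σ) ∧ (startsB n m maze).Nodup := by
  unfold startsB
  have main : ∀ (is : List Int) (st : List (Int × Int × Int)), (∀ i ∈ is, 0 ≤ i ∧ i < n) →
      (∀ σ, σ ∈ is.foldl (fun st r => (PySem.List.pyRange 0 m 1).foldl (fun st2 c =>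
          if cellAt maze r c = "@" then PySem.Set.add st2 (r, c, 0) else st2) st) st ↔
        σ ∈ st ∨ ∃ i ∈ is, ∃ k, (0 ≤ k ∧ k < m) ∧ cellAt maze i k = "@" ∧ σ = (i, k, 0)) ∧
      (st.Nodup → (is.foldl (fun st r => (PySem.List.pyRange 0 m 1).foldl (fun st2 c =>
          if cellAt maze r c = "@" then PySem.Set.add st2 (r, c, 0) else st2) st) st).Nodup) := by
    intro is
    induction is with
    | nil => intro st _; exact ⟨fun σ => by simp, fun h => h⟩
    | cons i is ih =>
      intro st his
      rw [List.foldl_cons]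
      obtain ⟨hm1, hn1⟩ := startsB_inner n m maze i (PySem.List.pyRange 0 m 1) st
      obtain ⟨hm2, hn2⟩ := ih _ (fun i' hi' => his i' (List.mem_cons_of_mem _ hi'))
      constructor
      · intro σ
        rw [hm2 σ, hm1 σ]
        constructor
        · rintro ((h | ⟨k, hk, hat, he⟩) | ⟨i', hi', k, hk, hat, he⟩)
          · exact Or.inl h
          · exact Or.inr ⟨i, List.mem_cons_self, k, PySem.List.mem_pyRange_one.mp hk, hat, he⟩
          · exact Or.inr ⟨i', List.mem_cons_of_mem _ hi', k, hk, hat, he⟩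
        · rintro (h | ⟨i', hi', k, hk, hat, he⟩)
          · exact Or.inl (Or.inl h)
          · rcases List.mem_cons.mp hi' with h | h
            · subst h
              exact Or.inl (Or.inr ⟨k, PySem.List.mem_pyRange_one.mpr hk, hat, he⟩)
            · exact Or.inr ⟨i', h, k, hk, hat, he⟩
      · exact fun h => hn2 (hn1 h)
  obtain ⟨hm, hn⟩ := main (PySem.List.pyRange 0 n 1) []
    (fun i hi => PySem.List.mem_pyRange_one.mp hi)
  constructor
  · intro σ
    rw [hm σ]
    simp only [List.not_mem_nil, false_or]
    constructor
    · rintro ⟨i, hi, k, hk, hat, rfl⟩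
      have hib := PySem.List.mem_pyRange_one.mp hi
      exact ⟨hib.1, hib.2, hk.1, hk.2, rfl, hat⟩
    · rintro ⟨h1, h2, h3, h4, h5, h6⟩
      refine ⟨σ.1, PySem.List.mem_pyRange_one.mpr ⟨h1, h2⟩, σ.2.1, ⟨h3, h4⟩, h6, ?_⟩
      have h2eq : σ.2 = (σ.2.1, 0) := Prod.ext rfl h5
      exact Prod.ext rfl h2eq
  · exact hn List.nodup_nil

theorem stepB_inner (n m j : Int) (maze : List (List String)) (σ0 : Int × Int × Int) :
    ∀ (ds : List (Int × Int)) (nw : List (Int × Int × Int)),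
    (∀ τ, τ ∈ ds.foldl (fun nw2 d =>
        let nx := σ0.1 + d.1
        let ny := σ0.2.1 + d.2
        if 0 ≤ nx ∧ nx < n ∧ 0 ≤ ny ∧ ny < m ∧ cellAt maze nx ny ≠ "#" then
          if cellAt maze nx ny = "s" then
            (if σ0.2.2 < j then PySem.Set.add nw2 (nx, ny, σ0.2.2 + 1) else nw2)
          else PySem.Set.add nw2 (nx, ny, σ0.2.2)
        else nw2) nw ↔
      τ ∈ nw ∨ AdjD n m j maze ds σ0 τ) ∧
    (nw.Nodup → (ds.foldl (fun nw2 d =>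
        let nx := σ0.1 + d.1
        let ny := σ0.2.1 + d.2
        if 0 ≤ nx ∧ nx < n ∧ 0 ≤ ny ∧ ny < m ∧ cellAt maze nx ny ≠ "#" then
          if cellAt maze nx ny = "s" then
            (if σ0.2.2 < j then PySem.Set.add nw2 (nx, ny, σ0.2.2 + 1) else nw2)
          else PySem.Set.add nw2 (nx, ny, σ0.2.2)
        else nw2) nw).Nodup) := by
  intro ds
  induction ds with
  | nil =>
    intro nw
    exact ⟨fun τ => by simpa using fun h => (adjD_nil h).elim, fun h => h⟩
  | cons d ds ih =>
    intro nw
    rw [List.foldl_cons]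
    have hstep : ∀ (nw2 : List (Int × Int × Int)) (τ : Int × Int × Int),
        (τ ∈ (let nx := σ0.1 + d.1
          let ny := σ0.2.1 + d.2
          if 0 ≤ nx ∧ nx < n ∧ 0 ≤ ny ∧ ny < m ∧ cellAt maze nx ny ≠ "#" then
            if cellAt maze nx ny = "s" then
              (if σ0.2.2 < j then PySem.Set.add nw2 (nx, ny, σ0.2.2 + 1) else nw2)
            else PySem.Set.add nw2 (nx, ny, σ0.2.2)
          else nw2) ↔ τ ∈ nw2 ∨ AdjD n m j maze [d] σ0 τ) := by
      intro nw2 τ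
      dsimp only
      split_ifs with hb hs hj'
      · -- 's' cell, budget ok
        rw [PySem.Set.mem_add]
        constructor
        · rintro (h | h)
          · exact Or.inl h
          · refine Or.inr ⟨d, List.mem_singleton_self d, ?_⟩
            subst h
            exact ⟨rfl, rfl, hb.1, hb.2.1, hb.2.2.1, hb.2.2.2.1, hb.2.2.2.2,
              Or.inl ⟨hs, hj', rfl⟩⟩
        · rintro (h | ⟨d', hd', ht1, ht2, hb1, hb2, hb3, hb4, hnw, hor⟩)
          · exact Or.inl h
          · obtain rfl : d = d' := by symm; simpa using hd'
            right
            rcases hor with ⟨_, _, h3'⟩ | ⟨hns, _⟩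
            · have ht1' : τ.1 = σ0.1 + d.1 := ht1
              have ht2' : τ.2.1 = σ0.2.1 + d.2 := ht2
              have h3'' : τ.2.2 = σ0.2.2 + 1 := h3'
              have h2eq : τ.2 = (σ0.2.1 + d.2, σ0.2.2 + 1) := Prod.ext ht2' h3''
              exact Prod.ext ht1' h2eq
            · rw [ht1, ht2] at hns
              exact absurd hs hns
      · -- 's' cell, no budget
        constructor
        · exact Or.inl
        · rintro (h | ⟨d', hd', ht1, ht2, hb1, hb2, hb3, hb4, hnw, hor⟩)
          · exact h
          · obtain rfl : d = d' := by symm; simpa using hd'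
            rcases hor with ⟨_, hlt, _⟩ | ⟨hns, _⟩
            · exact absurd hlt hj'
            · rw [ht1, ht2] at hns
              exact absurd hs hns
      · -- non-'s' cell
        rw [PySem.Set.mem_add]
        constructor
        · rintro (h | h)
          · exact Or.inl h
          · refine Or.inr ⟨d, List.mem_singleton_self d, ?_⟩
            subst h
            exact ⟨rfl, rfl, hb.1, hb.2.1, hb.2.2.1, hb.2.2.2.1, hb.2.2.2.2,
              Or.inr ⟨hs, rfl⟩⟩
        · rintro (h | ⟨d', hd', ht1, ht2, hb1, hb2, hb3, hb4, hnw, hor⟩)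
          · exact Or.inl h
          · obtain rfl : d = d' := by symm; simpa using hd'
            right
            rcases hor with ⟨hs', _, _⟩ | ⟨_, h3'⟩
            · rw [ht1, ht2] at hs'
              exact absurd hs' hs
            · have ht1' : τ.1 = σ0.1 + d.1 := ht1
              have ht2' : τ.2.1 = σ0.2.1 + d.2 := ht2
              have h3'' : τ.2.2 = σ0.2.2 := h3'
              have h2eq : τ.2 = (σ0.2.1 + d.2, σ0.2.2) := Prod.ext ht2' h3''
              exact Prod.ext ht1' h2eq
      · -- out of range or wall
        constructor
        · exact Or.inl
        · rintro (h | ⟨d', hd', ht1, ht2, hb1, hb2, hb3, hb4, hnw, hor⟩)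
          · exact h
          · obtain rfl : d = d' := by symm; simpa using hd'
            have ht1' : τ.1 = σ0.1 + d.1 := ht1
            have ht2' : τ.2.1 = σ0.2.1 + d.2 := ht2
            rw [ht1'] at hb1 hb2 hnw
            rw [ht2'] at hb3 hb4 hnw
            exact absurd ⟨hb1, hb2, hb3, hb4, hnw⟩ hb
    have hstepnd : ∀ (nw2 : List (Int × Int × Int)), nw2.Nodup →
        (let nx := σ0.1 + d.1
          let ny := σ0.2.1 + d.2
          if 0 ≤ nx ∧ nx < n ∧ 0 ≤ ny ∧ ny < m ∧ cellAt maze nx ny ≠ "#" then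
            if cellAt maze nx ny = "s" then
              (if σ0.2.2 < j then PySem.Set.add nw2 (nx, ny, σ0.2.2 + 1) else nw2)
            else PySem.Set.add nw2 (nx, ny, σ0.2.2)
          else nw2).Nodup := by
      intro nw2 hnd
      dsimp only
      split_ifs <;> first | exact PySem.Set.nodup_add _ _ hnd | exact hnd
    obtain ⟨hm2, hn2⟩ := ih _
    constructor
    · intro τ
      rw [hm2 τ, adjD_cons]
      have h1 := hstep nw τ
      dsimp only at h1
      rw [h1]
      tauto
    · intro hnd
      exact hn2 (hstepnd nw hnd)

theorem stepB_char (n m j : Int) (maze : List (List String)) (st : List (Int × Int × Int)) :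
    (∀ τ, τ ∈ stepB n m j maze st ↔ τ ∈ st ∨ ∃ σ ∈ st, AdjD n m j maze dirList σ τ) ∧
    (stepB n m j maze st).Nodup := by
  unfold stepB
  have main : ∀ (l acc : List (Int × Int × Int)),
      (∀ τ, τ ∈ l.foldl (fun nw σ => dirList.foldl (fun nw2 d =>
          let nx := σ.1 + d.1
          let ny := σ.2.1 + d.2
          if 0 ≤ nx ∧ nx < n ∧ 0 ≤ ny ∧ ny < m ∧ cellAt maze nx ny ≠ "#" then
            if cellAt maze nx ny = "s" then
              (if σ.2.2 < j then PySem.Set.add nw2 (nx, ny, σ.2.2 + 1) else nw2)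
            else PySem.Set.add nw2 (nx, ny, σ.2.2)
          else nw2) nw) acc ↔
        τ ∈ acc ∨ ∃ σ ∈ l, AdjD n m j maze dirList σ τ) ∧
      (acc.Nodup → (l.foldl (fun nw σ => dirList.foldl (fun nw2 d =>
          let nx := σ.1 + d.1
          let ny := σ.2.1 + d.2
          if 0 ≤ nx ∧ nx < n ∧ 0 ≤ ny ∧ ny < m ∧ cellAt maze nx ny ≠ "#" then
            if cellAt maze nx ny = "s" then
              (if σ.2.2 < j then PySem.Set.add nw2 (nx, ny, σ.2.2 + 1) else nw2)
            else PySem.Set.add nw2 (nx, ny, σ.2.2)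
          else nw2) nw) acc).Nodup) := by
    intro l
    induction l with
    | nil => intro acc; exact ⟨fun τ => by simp, fun h => h⟩
    | cons σ0 l ih =>
      intro acc
      rw [List.foldl_cons]
      obtain ⟨hm1, hn1⟩ := stepB_inner n m j maze σ0 dirList acc
      obtain ⟨hm2, hn2⟩ := ih _
      constructor
      · intro τ
        rw [hm2 τ, hm1 τ]
        simp only [List.mem_cons]
        constructor
        · rintro ((h | h) | ⟨σ, hσ, h⟩)
          · exact Or.inl h
          · exact Or.inr ⟨σ0, Or.inl rfl, h⟩
          · exact Or.inr ⟨σ, Or.inr hσ, h⟩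
        · rintro (h | ⟨σ, hσ | hσ, h⟩)
          · exact Or.inl (Or.inl h)
          · subst hσ; exact Or.inl (Or.inr h)
          · exact Or.inr ⟨σ, hσ, h⟩
      · exact fun h => hn2 (hn1 h)
  obtain ⟨hm, hn⟩ := main st (PySem.Set.ofList st)
  constructor
  · intro τ
    rw [hm τ, PySem.Set.mem_ofList]
  · exact hn (PySem.Set.nodup_ofList st)

theorem stepB_sub (n m j : Int) (maze : List (List String)) (st : List (Int × Int × Int)) :
    st ⊆ stepB n m j maze st := by
  intro τ hτ
  exact ((stepB_char n m j maze st).1 τ).mpr (Or.inl hτ)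

-- iterB lemmas
theorem iterB_sub (n m j : Int) (maze : List (List String)) :
    ∀ (t : Nat) (st : List (Int × Int × Int)), st ⊆ iterB n m j maze t st := by
  intro t
  induction t with
  | zero => intro st; exact fun _ h => h
  | succ t ih =>
    intro st
    unfold iterB
    split_ifs with he
    · exact fun _ h => h
    · exact fun σ hσ => ih _ (stepB_sub n m j maze st hσ)

theorem iterB_sound (n m j : Int) (maze : List (List String)) :
    ∀ (t : Nat) (st : List (Int × Int × Int)),
    (∀ σ ∈ st, Reach n m j maze σ) → ∀ σ ∈ iterB n m j maze t st, Reach n m j maze σ := by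
  intro t
  induction t with
  | zero => intro st h; exact h
  | succ t ih =>
    intro st h
    unfold iterB
    split_ifs with he
    · exact h
    · apply ih
      intro σ hσ
      rcases ((stepB_char n m j maze st).1 σ).mp hσ with hh | ⟨σ', hσ', hadj⟩
      · exact h σ hh
      · exact Reach.step _ _ (h σ' hσ') hadj

def canonList (n m j : Int) : List (Int × Int × Int) :=
  (PySem.List.pyRange 0 n 1).flatMap (fun i =>
    (PySem.List.pyRange 0 m 1).flatMap (fun k =>
      (PySem.List.pyRange 0 (j + 1) 1).map (fun s => (i, k, s))))

theorem mem_canonList (n m j : Int) (σ : Int × Int × Int) :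
    σ ∈ canonList n m j ↔ canonSt n m j σ := by
  unfold canonList canonSt
  simp only [List.mem_flatMap, List.mem_map, PySem.List.mem_pyRange_one]
  constructor
  · rintro ⟨i, ⟨hi1, hi2⟩, k, ⟨hk1, hk2⟩, s, ⟨hs1, hs2⟩, rfl⟩
    refine ⟨hi1, hi2, hk1, hk2, hs1, ?_⟩
    show s ≤ j
    omega
  · rintro ⟨h1, h2, h3, h4, h5, h6⟩
    refine ⟨σ.1, ⟨h1, h2⟩, σ.2.1, ⟨h3, h4⟩, σ.2.2, ⟨h5, by omega⟩, rfl⟩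

theorem length_canonList (n m j : Int) :
    (canonList n m j).length = n.toNat * m.toNat * (j + 1).toNat := by
  unfold canonList
  rw [List.length_flatMap]
  have hinner : ∀ i : Int, ((PySem.List.pyRange 0 m 1).flatMap (fun k =>
      (PySem.List.pyRange 0 (j + 1) 1).map (fun s => (i, k, s)))).length =
      m.toNat * (j + 1).toNat := by
    intro i
    rw [List.length_flatMap]
    have : ∀ k : Int, ((PySem.List.pyRange 0 (j + 1) 1).map
        (fun s => ((i : Int), (k : Int), s))).length = (j + 1).toNat := by
      intro k
      simp [PySem.List.length_pyRange_one]
    rw [List.map_congr_left (fun k _ => this k)]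
    rw [List.map_const', List.sum_replicate, PySem.List.length_pyRange_one]
    simp
  rw [List.map_congr_left (fun i _ => hinner i)]
  rw [List.map_const', List.sum_replicate, PySem.List.length_pyRange_one]
  simp [Nat.mul_assoc]

theorem canonLen_le_N (n m j : Int) :
    (canonList n m j).length ≤ (n * m * (j + 1)).toNat := by
  rw [length_canonList]
  by_cases hn : 0 ≤ n
  · by_cases hm : 0 ≤ m
    · by_cases hj : 0 ≤ j + 1
      · have : n * m * (j + 1) = ((n.toNat * m.toNat * (j + 1).toNat : Nat) : Int) := by
          push_cast
          rw [Int.toNat_of_nonneg hn, Int.toNat_of_nonneg hm, Int.toNat_of_nonneg hj]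
        rw [this, Int.toNat_natCast]
      · have : (j + 1).toNat = 0 := by omega
        simp [this]
    · have : m.toNat = 0 := by omega
      simp [this]
  · have : n.toNat = 0 := by omega
    simp [this]

theorem iterB_closed (n m j : Int) (maze : List (List String)) :
    ∀ (t : Nat) (st : List (Int × Int × Int)), st.Nodup → (∀ σ ∈ st, canonSt n m j σ) →
    (canonList n m j).length ≤ st.length + t →
    stepB n m j maze (iterB n m j maze t st) ⊆ iterB n m j maze t st := by
  intro t
  induction t with
  | zero =>
    intro st hnd hcan hlen
    -- st already covers all canonical states
    have hsub : st ⊆ canonList n m j := fun σ h => (mem_canonList n m j σ).mpr (hcan σ h)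
    have hle : st.length ≤ (canonList n m j).length :=
      (List.subperm_of_subset hnd hsub).length_le
    have hperm : st.Perm (canonList n m j) :=
      (List.subperm_of_subset hnd hsub).perm_of_length_le (by simpa using hlen)
    intro τ hτ
    rcases ((stepB_char n m j maze st).1 τ).mp hτ with h | ⟨σ, hσ, hadj⟩
    · exact h
    · have hc : canonSt n m j τ :=
        adj_canon ⟨(hcan σ hσ).2.2.2.2.1, (hcan σ hσ).2.2.2.2.2⟩ hadj
      exact hperm.mem_iff.mpr ((mem_canonList n m j τ).mpr hc)
  | succ t ih =>
    intro st hnd hcan hlen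
    unfold iterB
    split_ifs with he
    · intro τ hτ
      exact ((PySem.Set.equal_iff _ _).mp he τ).mp hτ
    · apply ih
      · exact (stepB_char n m j maze st).2
      · intro σ hσ
        rcases ((stepB_char n m j maze st).1 σ).mp hσ with h | ⟨σ', hσ', hadj⟩
        · exact hcan σ h
        · exact adj_canon ⟨(hcan σ' hσ').2.2.2.2.1, (hcan σ' hσ').2.2.2.2.2⟩ hadj
      · -- strict growth
        have hsub := stepB_sub n m j maze st
        have hne : ∃ τ ∈ stepB n m j maze st, τ ∉ st := by
          by_contra hc
          push_neg at hc
          exact he ((PySem.Set.equal_iff _ _).mpr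
            (fun τ => ⟨fun h => hc τ h, fun h => hsub h⟩))
        have hlt : st.length < (stepB n m j maze st).length := by
          obtain ⟨τ, hτ, hτn⟩ := hne
          have hsp := List.subperm_of_subset hnd hsub
          rcases Nat.lt_or_ge st.length (stepB n m j maze st).length with h | h
          · exact h
          · exfalso
            have hperm := hsp.perm_of_length_le h
            exact hτn (hperm.mem_iff.mpr hτ)
        omega

-- no '@' in range → nothing reachable
theorem noReach (n m j : Int) (maze : List (List String))
    (hno : ∀ i, 0 ≤ i → i < n → ∀ k, 0 ≤ k → k < m → cellAt maze i k ≠ "@") :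
    ∀ σ, ¬ Reach n m j maze σ := by
  intro σ hr
  induction hr with
  | start σ h => exact hno σ.1 h.1 h.2.1 σ.2.1 h.2.2.1 h.2.2.2.1 h.2.2.2.2.2
  | step σ τ hr hadj ih => exact ih

theorem iterB_nil (n m j : Int) (maze : List (List String)) :
    ∀ t : Nat, iterB n m j maze t [] = [] := by
  intro t
  cases t with
  | zero => rfl
  | succ t =>
    unfold iterB
    rw [if_pos (show (PySem.Set.equal (stepB n m j maze []) [] : Bool) = true from rfl)]

theorem solveA_succ (n m j : Int) (maze : List (List String))
    (hpre : j < 0 → ∀ i, 0 ≤ i → i < n → ∀ k, 0 ≤ k → k < m → cellAt maze i k ≠ "@") :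
    solve n m j maze = "SUCCESS" ↔
      ∃ σ, Reach n m j maze σ ∧ cellAt maze σ.1 σ.2.1 = "x" := by
  unfold solve
  by_cases hj : 0 ≤ j
  · obtain ⟨hsh, hq, hm⟩ := initA_char n m j maze hj
    constructor
    · intro h
      refine bfs_sound n m j maze _ _ hsh ?_ h
      intro σ hσ
      have hs := (hq σ).mp hσ
      exact ⟨start_canon hj hs, Reach.start σ hs⟩
    · rintro ⟨σ, hr, hcx⟩
      rcases bfs_cases n m j maze (initA n m j maze).1 (initA n m j maze).2 with h | h
      · exact h
      · exfalso
        refine bfs_complete n m j maze hj _ _ hsh ?_ ?_ ?_ h σ hr hcx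
        · intro σ' hσ'
          have hs := (hq σ').mp hσ'
          exact ⟨start_canon hj hs, (hm σ' (start_canon hj hs)).mpr hs⟩
        · intro σ' hs
          exact (hm σ' (start_canon hj hs)).mpr hs
        · intro σ' hc hmk hnq
          exact absurd ((hq σ').mpr ((hm σ' hc).mp hmk)) hnq
  · have hno := hpre (by omega)
    have hq0 : (initA n m j maze).2 = [] := init_queue_noat n m j maze hno
    rw [hq0]
    have hnr := noReach n m j maze hno
    constructor
    · intro h
      simp [bfs] at h
    · rintro ⟨σ, hr, _⟩
      exact absurd hr (hnr σ)

theorem solveA_cases (n m j : Int) (maze : List (List String)) :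
    solve n m j maze = "SUCCESS" ∨ solve n m j maze = "IMPOSSIBLE" := by
  unfold solve
  exact bfs_cases n m j maze _ _

theorem solveB_succ (n m j : Int) (maze : List (List String))
    (hpre : j < 0 → ∀ i, 0 ≤ i → i < n → ∀ k, 0 ≤ k → k < m → cellAt maze i k ≠ "@") :
    solve_alt n m j maze = "SUCCESS" ↔
      ∃ σ, Reach n m j maze σ ∧ cellAt maze σ.1 σ.2.1 = "x" := by
  unfold solve_alt
  obtain ⟨hsc, hsnd⟩ := startsB_char n m maze
  by_cases hj : 0 ≤ j
  · have hcanst : ∀ σ ∈ startsB n m maze, canonSt n m j σ :=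
      fun σ h => start_canon hj ((hsc σ).mp h)
    have hmemiff : ∀ σ, σ ∈ iterB n m j maze (n * m * (j + 1)).toNat (startsB n m maze) ↔
        Reach n m j maze σ := by
      intro σ
      constructor
      · exact iterB_sound n m j maze _ _ (fun σ' h => Reach.start σ' ((hsc σ').mp h)) σ
      · intro hr
        induction hr with
        | start σ' hs => exact iterB_sub n m j maze _ _ ((hsc σ').mpr hs)
        | step σ' τ hr hadj ih =>
          apply iterB_closed n m j maze _ _ hsnd hcanst
            (by have := canonLen_le_N n m j; omega)
          exact ((stepB_char n m j maze _).1 τ).mpr (Or.inr ⟨σ', ih, hadj⟩)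
    constructor
    · intro h
      cases hany : (iterB n m j maze (n * m * (j + 1)).toNat (startsB n m maze)).any
          (fun σ => cellAt maze σ.1 σ.2.1 == "x") with
      | false => rw [hany] at h; simp at h
      | true =>
        obtain ⟨σ, hσ, hcx⟩ := List.any_eq_true.mp hany
        exact ⟨σ, (hmemiff σ).mp hσ, by simpa using hcx⟩
    · rintro ⟨σ, hr, hcx⟩
      have : (iterB n m j maze (n * m * (j + 1)).toNat (startsB n m maze)).any
          (fun σ => cellAt maze σ.1 σ.2.1 == "x") = true :=
        List.any_eq_true.mpr ⟨σ, (hmemiff σ).mpr hr, by simpa using hcx⟩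
      rw [this]
      rfl
  · have hno := hpre (by omega)
    have hnr := noReach n m j maze hno
    have hs0 : startsB n m maze = [] := by
      rw [List.eq_nil_iff_forall_not_mem]
      intro σ hσ
      have hs := (hsc σ).mp hσ
      exact hno σ.1 hs.1 hs.2.1 σ.2.1 hs.2.2.1 hs.2.2.2.1 hs.2.2.2.2.2
    rw [hs0, iterB_nil]
    constructor
    · intro h
      simp at h
    · rintro ⟨σ, hr, _⟩
      exact absurd hr (hnr σ)

theorem solveB_cases (n m j : Int) (maze : List (List String)) :
    solve_alt n m j maze = "SUCCESS" ∨ solve_alt n m j maze = "IMPOSSIBLE" := by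
  unfold solve_alt
  cases hany : (iterB n m j maze (n * m * (j + 1)).toNat (startsB n m maze)).any
      (fun σ => cellAt maze σ.1 σ.2.1 == "x") with
  | false => right; rfl
  | true => left; rfl

-- ===== VERDICT (by name: the statement is the Claim_ definition above) =====
theorem solve_spec : Claim_equal_solve := by
  unfold Claim_equal_solve
  intro n m j maze hdom hpre
  unfold Spec_solve
  have hpre' : j < 0 → ∀ i, 0 ≤ i → i < n → ∀ k, 0 ≤ k → k < m → cellAt maze i k ≠ "@" := by
    intro hj i hi1 hi2 k hk1 hk2
    exact hpre.2 hj i (PySem.List.mem_pyRange_one.mpr ⟨hi1, hi2⟩)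
      k (PySem.List.mem_pyRange_one.mpr ⟨hk1, hk2⟩)
  by_cases hx : ∃ σ, Reach n m j maze σ ∧ cellAt maze σ.1 σ.2.1 = "x"
  · rw [(solveA_succ n m j maze hpre').mpr hx, (solveB_succ n m j maze hpre').mpr hx]
  · have hA : solve n m j maze = "IMPOSSIBLE" := by
      rcases solveA_cases n m j maze with h | h
      · exact absurd ((solveA_succ n m j maze hpre').mp h) hx
      · exact h
    have hB : solve_alt n m j maze = "IMPOSSIBLE" := by
      rcases solveB_cases n m j maze with h | h
      · exact absurd ((solveB_succ n m j maze hpre').mp h) hx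
      · exact h
    rw [hA, hB]
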